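-- pv_equiv track=rewrite | github.com/iOTMecit/TRADE | Evaluation Scripts/NicadCPDRelativeRecallUnique.py | are_clone_classes_similar
-- ===== SOURCE A (Python) =====
-- def are_sources_similar(src1, src2):
--     file1, start1, end1 = src1
--     file2, start2, end2 = src2
--     return file1 == file2 and abs(start1 - start2) <= 5 and abs(end1 - end2) <= 5
--
-- def are_clone_classes_similar(class1, class2):
--     # Check if two clone classes are similar based on file names and line ranges
--     return all(
--         any(are_sources_similar(src1, src2) for src2 in class2)
--         for src1 in class1
--     ) and all(
--         any(are_sources_similar(src2, src1) for src1 in class1)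
--         for src2 in class2
--     )
-- ===== SOURCE B (Python) =====
-- def are_clone_classes_similar(class1, class2):
--     # Hash-index each class's (start, end) intervals by file name, so each
--     # coverage lookup scans only same-file sources instead of the whole class.
--     def index_by_file(cls):
--         idx = {}
--         for f, s, e in cls:
--             idx.setdefault(f, []).append((s, e))
--         return idx
--
--     idx1 = index_by_file(class1)
--     idx2 = index_by_file(class2)
--
--     def covered(src, idx):
--         f, s, e = src
--         return any(abs(s - s2) <= 5 and abs(e - e2) <= 5
--                    for (s2, e2) in idx.get(f, []))
--
--     return (all(covered(src, idx2) for src in class1)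
--             and all(covered(src, idx1) for src in class2))
-- ===== Notes on version B (the rewrite author's own statement) =====
-- stated objective: alternative
-- what changed: Builds a hash index (dict) from file name to that class's (start, end) intervals once per class, so each source's coverage check scans only the same-file bucket and the file-name comparison disappears from the inner loop, instead of A's all(any(...)) scan over every cross pair.
import Mathlib
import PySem

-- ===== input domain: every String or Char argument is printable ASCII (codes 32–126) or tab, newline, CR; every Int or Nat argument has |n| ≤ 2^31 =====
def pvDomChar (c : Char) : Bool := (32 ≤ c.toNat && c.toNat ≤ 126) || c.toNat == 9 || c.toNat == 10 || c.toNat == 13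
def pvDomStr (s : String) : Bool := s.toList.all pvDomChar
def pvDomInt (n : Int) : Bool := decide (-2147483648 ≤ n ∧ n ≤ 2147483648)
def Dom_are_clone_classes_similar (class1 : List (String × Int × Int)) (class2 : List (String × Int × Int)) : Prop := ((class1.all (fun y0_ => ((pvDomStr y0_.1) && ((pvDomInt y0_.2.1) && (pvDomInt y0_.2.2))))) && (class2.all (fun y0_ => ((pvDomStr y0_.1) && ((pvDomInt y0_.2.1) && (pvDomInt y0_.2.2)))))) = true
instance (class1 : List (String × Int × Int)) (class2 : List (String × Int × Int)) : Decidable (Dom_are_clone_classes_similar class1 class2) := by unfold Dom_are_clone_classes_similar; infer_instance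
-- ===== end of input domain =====

-- B replaces A's two all(any(..)) scans over every cross pair by a dict indexing each
-- class's intervals by file name, so coverage checks scan only the same-file bucket
-- (objective: alternative — a hash index removes the cross-file inner scan).

-- ===== PORT A =====
-- helper are_sources_similar of the Python A
def pvSim (src1 : String × Int × Int) (src2 : String × Int × Int) : Bool :=
  src1.1 == src2.1 && (src1.2.1 - src2.2.1).natAbs ≤ 5 && (src1.2.2 - src2.2.2).natAbs ≤ 5

def are_clone_classes_similar (class1 : List (String × Int × Int)) (class2 : List (String × Int × Int)) : Bool :=
  (class1.all (fun src1 => class2.any (fun src2 => pvSim src1 src2))) &&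
  (class2.all (fun src2 => class1.any (fun src1 => pvSim src2 src1)))

-- ===== PORT B =====
-- B's index_by_file: idx.setdefault(f, []).append((s, e)), i.e. idx[f] = idx.get(f, []) + [(s, e)]
def pvIndexByFile (cls : List (String × Int × Int)) : PySem.Dict String (List (Int × Int)) :=
  cls.foldl (fun d t => d.modify t.1 [] (· ++ [t.2])) PySem.Dict.empty

-- B's covered: scan only the same-file bucket, no file comparison inside
def pvCovered (src : String × Int × Int) (idx : PySem.Dict String (List (Int × Int))) : Bool :=
  (idx.getD src.1 []).any (fun q => (src.2.1 - q.1).natAbs ≤ 5 && (src.2.2 - q.2).natAbs ≤ 5)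

def are_clone_classes_similar_alt (class1 : List (String × Int × Int)) (class2 : List (String × Int × Int)) : Bool :=
  let idx1 := pvIndexByFile class1
  let idx2 := pvIndexByFile class2
  (class1.all (fun src => pvCovered src idx2)) &&
  (class2.all (fun src => pvCovered src idx1))

-- ===== PRECONDITION & SPEC =====
def Spec_are_clone_classes_similar (class1 : List (String × Int × Int)) (class2 : List (String × Int × Int)) (out : Bool) : Prop := out = are_clone_classes_similar_alt class1 class2
instance (class1 : List (String × Int × Int)) (class2 : List (String × Int × Int)) (out : Bool) : Decidable (Spec_are_clone_classes_similar class1 class2 out) := by unfold Spec_are_clone_classes_similar; infer_instance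

-- ===== CLAIM (what is proved, stated in full; the proofs are below) =====
def Claim_equal_are_clone_classes_similar : Prop := ∀ (class1 : List (String × Int × Int)) (class2 : List (String × Int × Int)), Dom_are_clone_classes_similar class1 class2 → Spec_are_clone_classes_similar class1 class2 (are_clone_classes_similar class1 class2)

-- ===== LEMMAS AND PROOFS =====

-- the same-file bucket of B's index holds exactly the intervals of that file, in order
theorem bucket_eq (cls : List (String × Int × Int)) (f : String) :
    (pvIndexByFile cls).getD f []
      = (cls.filter (fun p => p.1 == f)).map (·.2) := by
  simpa [pvIndexByFile] using
    PySem.Dict.getD_foldl_modify_append (d := PySem.Dict.empty) (l := cls) (c := f)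

-- B's bucket scan for one source equals A's any-over-the-whole-class scan
theorem covered_eq_any (src : String × Int × Int) (cls : List (String × Int × Int)) :
    pvCovered src (pvIndexByFile cls) = cls.any (fun y => pvSim src y) := by
  rw [pvCovered, bucket_eq, List.any_map, List.any_filter]
  apply List.any_congr rfl
  intro y
  rw [Bool.eq_iff_iff]
  simp only [pvSim, Function.comp_apply, Bool.and_eq_true, beq_iff_eq, decide_eq_true_eq]
  constructor
  · rintro ⟨h1, h2, h3⟩; exact ⟨⟨h1.symm, h2⟩, h3⟩
  · rintro ⟨⟨h1, h2⟩, h3⟩; exact ⟨h1.symm, h2, h3⟩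

-- ===== VERDICT (by name: the statement is the Claim_ definition above) =====
theorem are_clone_classes_similar_spec : Claim_equal_are_clone_classes_similar := by
  intro class1 class2 _
  unfold Spec_are_clone_classes_similar
  simp only [are_clone_classes_similar, are_clone_classes_similar_alt]
  rw [List.all_congr rfl (fun a => (covered_eq_any a class2).symm),
      List.all_congr rfl (fun b => (covered_eq_any b class1).symm)]
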